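-- pv_equiv track=rewrite | github.com/niklasmh/ntnu | TDT4127 - Programmering og Nummerikk/3/Fibonacci.py | f
-- ===== SOURCE A (Python) =====
-- def f(k):
--     x1 = 0
--     x2 = 1
--     x3 = x1 + x2
--     s = x1 + x2 + x3
--     l = [x1, x2, x3]
--     for x in range(4, k + 1):
--         if x % 3 == 0:
--             x3 = x1 + x2
--             s += x3
--             l.append(x3)
--         elif x % 3 == 1:
--             x1 = x2 + x3
--             s += x1
--             l.append(x1)
--         else:
--             x2 = x1 + x3
--             s += x2
--             l.append(x2)
--
--     return max(x1, x2, x3), s, l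
-- ===== SOURCE B (Python) =====
-- def f(k):
--     l = [0, 1, 1]
--     for _ in range(4, k + 1):
--         l.append(l[-1] + l[-2])
--     return max(l[-1], l[-2], l[-3]), sum(l), l
-- ===== Notes on version B (the rewrite author's own statement) =====
-- stated objective: simpler
-- what changed: B drops A's x%3 three-way branch and three rotating scalar accumulators: it only appends l[-1]+l[-2] each iteration, then takes max of the last three elements and sum(l) at the end.
import Mathlib
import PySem

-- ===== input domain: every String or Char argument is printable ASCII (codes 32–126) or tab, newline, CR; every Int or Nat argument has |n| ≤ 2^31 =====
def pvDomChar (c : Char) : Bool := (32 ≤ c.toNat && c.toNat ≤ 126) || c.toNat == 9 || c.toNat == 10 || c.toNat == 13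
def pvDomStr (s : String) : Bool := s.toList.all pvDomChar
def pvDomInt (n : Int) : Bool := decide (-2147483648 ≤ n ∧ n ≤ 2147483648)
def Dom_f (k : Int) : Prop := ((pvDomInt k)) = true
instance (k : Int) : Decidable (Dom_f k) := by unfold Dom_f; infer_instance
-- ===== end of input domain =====

-- B is simpler: it drops A's x%3 three-way branch and the three rotating scalars,
-- appending l[-1]+l[-2] each step and taking max of the last three and sum(l) at the end.

-- ===== PORT A =====
-- loop body of A: state is (x1, x2, x3, s, l); branch on x % 3 as in the Python
def fStepA (st : Int × Int × Int × Int × List Int) (x : Int) : Int × Int × Int × Int × List Int :=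
  match st with
  | (x1, x2, x3, s, l) =>
    if PySem.Int.mod x 3 = 0 then
      (x1, x2, x1 + x2, s + (x1 + x2), l ++ [x1 + x2])
    else if PySem.Int.mod x 3 = 1 then
      (x2 + x3, x2, x3, s + (x2 + x3), l ++ [x2 + x3])
    else
      (x1, x1 + x3, x3, s + (x1 + x3), l ++ [x1 + x3])

def f (k : Int) : Int × Int × List Int :=
  let st := (PySem.List.pyRange 4 (k + 1) 1).foldl fStepA (0, 1, 1, 2, [0, 1, 1])
  match st with
  | (x1, x2, x3, s, l) => (max x1 (max x2 x3), s, l)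

-- ===== PORT B =====
-- loop body of B: append l[-1] + l[-2].  The list always has ≥ 3 elements, so the
-- pyGet? defaults (.getD 0) are unreachable (Python would raise only on a short list).
def fStepB (l : List Int) (_ : Int) : List Int :=
  l ++ [(PySem.List.pyGet? l (-1)).getD 0 + (PySem.List.pyGet? l (-2)).getD 0]

def f_alt (k : Int) : Int × Int × List Int :=
  let l := (PySem.List.pyRange 4 (k + 1) 1).foldl fStepB [0, 1, 1]
  (max ((PySem.List.pyGet? l (-1)).getD 0)
     (max ((PySem.List.pyGet? l (-2)).getD 0) ((PySem.List.pyGet? l (-3)).getD 0)),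
   l.sum, l)

-- ===== PRECONDITION & SPEC =====
def Spec_f (k : Int) (out : Int × Int × List Int) : Prop := out = f_alt k
instance (k : Int) (out : Int × Int × List Int) : Decidable (Spec_f k out) := by unfold Spec_f; infer_instance

-- ===== CLAIM (what is proved, stated in full; the proofs are below) =====
def Claim_equal_f : Prop := ∀ (k : Int), Dom_f k → Spec_f k (f k)

-- ===== LEMMAS AND PROOFS =====

-- indexing the last three elements
theorem pyGet_last3 (t : List Int) (a b c : Int) :
    (PySem.List.pyGet? (t ++ [a, b, c]) (-1)).getD 0 = c ∧
    (PySem.List.pyGet? (t ++ [a, b, c]) (-2)).getD 0 = b ∧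
    (PySem.List.pyGet? (t ++ [a, b, c]) (-3)).getD 0 = a := by
  refine ⟨?_, ?_, ?_⟩
  · rw [PySem.List.pyGet?_neg_ofNat _ 1 (by omega) (by simp)]
    simp [show t.length + 3 - 1 = t.length + 2 by omega]
  · rw [PySem.List.pyGet?_neg_ofNat _ 2 (by omega) (by simp)]
    simp [show t.length + 3 - 2 = t.length + 1 by omega]
  · rw [PySem.List.pyGet?_neg_ofNat _ 3 (by omega) (by simp)]
    simp

-- loop invariant relating A's five-component state to B's list, with the next index x
def StRel (x : Int) (st : Int × Int × Int × Int × List Int) (l : List Int) : Prop :=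
  ∃ t a b c, st.2.2.2.2 = t ++ [a, b, c] ∧ l = t ++ [a, b, c] ∧ st.2.2.2.1 = l.sum ∧
    ((PySem.Int.mod x 3 = 1 ∧ st.1 = a ∧ st.2.1 = b ∧ st.2.2.1 = c) ∨
     (PySem.Int.mod x 3 = 2 ∧ st.1 = c ∧ st.2.1 = a ∧ st.2.2.1 = b) ∨
     (PySem.Int.mod x 3 = 0 ∧ st.1 = b ∧ st.2.1 = c ∧ st.2.2.1 = a))

theorem rel_step (x : Int) (st : Int × Int × Int × Int × List Int) (l : List Int) (y : Int)
    (h : StRel x st l) : StRel (x + 1) (fStepA st x) (fStepB l y) := by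
  obtain ⟨t, a, b, c, hA, hB, hs, hv⟩ := h
  obtain ⟨x1, x2, x3, s, la⟩ := st
  simp only at hA hs hv
  subst hA hB hs
  have h1 := (pyGet_last3 t a b c).1
  have h2 := (pyGet_last3 t a b c).2.1
  have hmod : PySem.Int.mod x 3 = x % 3 := PySem.Int.mod_eq_emod_of_pos (by omega)
  have hmod1 : PySem.Int.mod (x + 1) 3 = (x + 1) % 3 := PySem.Int.mod_eq_emod_of_pos (by omega)
  rw [hmod] at hv
  rcases hv with ⟨hm, e1, e2, e3⟩ | ⟨hm, e1, e2, e3⟩ | ⟨hm, e1, e2, e3⟩ <;> subst e1 e2 e3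
  · -- x % 3 = 1 : (a,b,c) = (x1,x2,x3); A sets x1 := x2 + x3 ; B appends x3 + x2
    refine ⟨t ++ [x1], x2, x3, x2 + x3, ?_, ?_, ?_,
      Or.inr (Or.inl ⟨by rw [hmod1]; omega, ?_, ?_, ?_⟩)⟩ <;>
      simp [fStepA, fStepB, hm, h1, h2, List.sum_append] <;> try ring
  · -- x % 3 = 2 : (a,b,c) = (x2,x3,x1); A sets x2 := x1 + x3 ; B appends x1 + x3
    refine ⟨t ++ [x2], x3, x1, x1 + x3, ?_, ?_, ?_,
      Or.inr (Or.inr ⟨by rw [hmod1]; omega, ?_, ?_, ?_⟩)⟩ <;>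
      simp [fStepA, fStepB, hm, h1, h2, List.sum_append] <;> try ring
  · -- x % 3 = 0 : (a,b,c) = (x3,x1,x2); A sets x3 := x1 + x2 ; B appends x2 + x1
    refine ⟨t ++ [x3], x1, x2, x1 + x2, ?_, ?_, ?_,
      Or.inl ⟨by rw [hmod1]; omega, ?_, ?_, ?_⟩⟩ <;>
      simp [fStepA, fStepB, hm, h1, h2, List.sum_append] <;> try ring

theorem rel_iter (n : Nat) :
    StRel (4 + n) ((PySem.List.pyRange 4 (4 + (n : Int)) 1).foldl fStepA (0, 1, 1, 2, [0, 1, 1]))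
      ((PySem.List.pyRange 4 (4 + (n : Int)) 1).foldl fStepB [0, 1, 1]) := by
  induction n with
  | zero =>
    have h0 : PySem.List.pyRange 4 (4 + ((0 : Nat) : Int)) 1 = [] :=
      PySem.List.pyRange_one_eq_nil (by norm_num)
    refine ⟨[], 0, 1, 1, ?_, ?_, ?_, Or.inl ⟨by norm_num, ?_, ?_, ?_⟩⟩ <;> simp only [h0, List.foldl_nil] <;> rfl
  | succ n ih =>
    have hr : PySem.List.pyRange 4 (4 + ((n : Int) + 1)) 1
        = PySem.List.pyRange 4 (4 + (n : Int)) 1 ++ [4 + (n : Int)] := by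
      rw [show (4 : Int) + ((n : Int) + 1) = (4 + (n : Int)) + 1 by ring]
      exact PySem.List.pyRange_one_succ_right (by omega)
    push_cast
    rw [hr, List.foldl_append, List.foldl_append]
    simpa [add_assoc] using rel_step (4 + (n : Int)) _ _ (4 + (n : Int)) ih

-- ===== VERDICT (by name: the statement is the Claim_ definition above) =====
theorem f_spec : Claim_equal_f := by
  intro k _
  unfold Spec_f f f_alt
  by_cases hk : k + 1 ≤ 4
  · rw [PySem.List.pyRange_one_eq_nil hk]
    decide
  · have hn : k + 1 = 4 + (((k - 3).toNat : Nat) : Int) := by omega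
    rw [hn]
    obtain ⟨t, a, b, c, hA, hB, hs, hv⟩ := rel_iter (k - 3).toNat
    rw [show ∀ st : Int × Int × Int × Int × List Int,
        (match st with | (x1, x2, x3, s, l) => ((max x1 (max x2 x3), s, l) : Int × Int × List Int))
          = (max st.1 (max st.2.1 st.2.2.1), st.2.2.2.1, st.2.2.2.2) from fun _ => rfl]
    rw [hB]
    simp only [(pyGet_last3 t a b c).1, (pyGet_last3 t a b c).2.1, (pyGet_last3 t a b c).2.2]
    refine Prod.ext ?_ (Prod.ext ?_ ?_)
    · rcases hv with ⟨_, e1, e2, e3⟩ | ⟨_, e1, e2, e3⟩ | ⟨_, e1, e2, e3⟩ <;>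
        rw [e1, e2, e3] <;> simp <;> omega
    · rw [hs, hB]
    · rw [hA]
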